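-- pv_equiv track=rewrite | github.com/dsardelic/AdventOfCode2022 | aoc2022/day_08_part_1.py | visibles_in_cols
-- ===== SOURCE A (Python) =====
-- def visibles_in_cols(heights, row_range):
--     visibles = set()
--     for j in range(len(heights[0])):
--         col_visibles = set()
--         curr_max_visible_height = -1
--         for i in row_range:
--             curr_height = heights[i][j]
--             if curr_height > curr_max_visible_height:
--                 col_visibles.add((i, j))
--                 curr_max_visible_height = curr_height
--         visibles |= col_visibles
--     return visibles
-- ===== SOURCE B (Python) =====
-- def visibles_in_cols(heights, row_range):
--     result = []
--     for j in range(len(heights[0])):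
--         col = [heights[i][j] for i in row_range]
--         prefix = []
--         m = -1
--         for h in col:
--             prefix.append(m)
--             m = max(m, h)
--         result.extend((i, j) for (i, h), p in zip(zip(row_range, col), prefix) if h > p)
--     return set(result)
-- ===== Notes on version B (the rewrite author's own statement) =====
-- stated objective: alternative
-- what changed: Replaces the fused update-and-test loop with incremental set unions by a two-phase per-column pass: first build the column and its prefix-maximum table, then select visible cells by zipping and filtering, collecting everything in one flat list turned into a set at the end.
import Mathlib
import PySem

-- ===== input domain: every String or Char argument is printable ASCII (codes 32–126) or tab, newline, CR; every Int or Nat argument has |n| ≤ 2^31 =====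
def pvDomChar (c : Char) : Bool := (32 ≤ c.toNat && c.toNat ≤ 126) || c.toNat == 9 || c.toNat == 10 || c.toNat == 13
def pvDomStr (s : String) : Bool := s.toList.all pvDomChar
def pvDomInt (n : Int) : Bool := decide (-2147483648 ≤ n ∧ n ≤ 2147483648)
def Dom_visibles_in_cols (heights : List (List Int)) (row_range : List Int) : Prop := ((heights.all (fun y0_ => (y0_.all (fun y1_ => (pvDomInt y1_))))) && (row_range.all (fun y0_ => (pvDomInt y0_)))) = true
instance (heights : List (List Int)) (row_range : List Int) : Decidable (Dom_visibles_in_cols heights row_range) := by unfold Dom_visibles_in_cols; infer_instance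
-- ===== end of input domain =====

-- B replaces the fused update-and-test loop over sets by a two-phase per-column pass
-- (prefix-maximum table, then a zip-and-filter selection); alternative decomposition, same cost.

-- ===== PORT A =====
def visibles_in_cols (heights : List (List Int)) (row_range : List Int) : List (Int × Int) :=
  (PySem.List.pyRange 0 ((PySem.List.pyGetD heights 0 []).length : Int) 1).foldl
    (fun (visibles : PySem.Set (Int × Int)) j =>
      let col := row_range.foldl
        (fun (st : PySem.Set (Int × Int) × Int) i =>
          let curr := PySem.List.pyGetD (PySem.List.pyGetD heights i []) j 0
          if curr > st.2 then (PySem.Set.add st.1 (i, j), curr) else st)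
        (PySem.Set.empty, -1)
      PySem.Set.union visibles col.1)
    PySem.Set.empty

-- ===== PORT B =====
def visibles_in_cols_alt (heights : List (List Int)) (row_range : List Int) : List (Int × Int) :=
  let result := (PySem.List.pyRange 0 ((PySem.List.pyGetD heights 0 []).length : Int) 1).foldl
    (fun (acc : List (Int × Int)) j =>
      let col := row_range.map (fun i => PySem.List.pyGetD (PySem.List.pyGetD heights i []) j 0)
      let pr := col.foldl (fun (st : List Int × Int) h => (st.1 ++ [st.2], max st.2 h)) ([], -1)
      acc ++ ((row_range.zip col).zip pr.1).filterMap
        (fun x => if x.1.2 > x.2 then some (x.1.1, j) else none))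
    []
  PySem.Set.ofList result

-- ===== PRECONDITION & SPEC =====
-- Pre_ excludes exactly the inputs where the Python raises IndexError: the empty grid
-- (heights[0]), and — when there is at least one column — a row index outside heights or a
-- selected row shorter than the first row.
def Pre_visibles_in_cols (heights : List (List Int)) (row_range : List Int) : Prop :=
  heights ≠ [] ∧
    ((PySem.List.pyGetD heights 0 []).length = 0 ∨
      ∀ i ∈ row_range, PySem.Raise.InRange heights.length i ∧
        (PySem.List.pyGetD heights 0 []).length ≤ (PySem.List.pyGetD heights i []).length)
instance (heights : List (List Int)) (row_range : List Int) : Decidable (Pre_visibles_in_cols heights row_range) := by unfold Pre_visibles_in_cols; infer_instance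
def pvWitness_visibles_in_cols : List (List Int) × List Int := ([[3, 1], [2, 5]], [0, 1])
def Spec_visibles_in_cols (heights : List (List Int)) (row_range : List Int) (out : List (Int × Int)) : Prop := out = visibles_in_cols_alt heights row_range
instance (heights : List (List Int)) (row_range : List Int) (out : List (Int × Int)) : Decidable (Spec_visibles_in_cols heights row_range out) := by unfold Spec_visibles_in_cols; infer_instance

-- ===== CLAIM (what is proved, stated in full; the proofs are below) =====
def Claim_equal_visibles_in_cols : Prop := ∀ (heights : List (List Int)) (row_range : List Int), Dom_visibles_in_cols heights row_range → Pre_visibles_in_cols heights row_range → Spec_visibles_in_cols heights row_range (visibles_in_cols heights row_range)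

-- ===== LEMMAS AND PROOFS =====

-- the visible cells of column j, in row_range order, fused form (reference function)
def pvSel (g : Int → Int) (j : Int) : List Int → Int → List (Int × Int)
  | [], _ => []
  | i :: rest, m => if g i > m then (i, j) :: pvSel g j rest (g i) else pvSel g j rest m

-- the prefix-maximum table (max of strictly earlier entries and the seed)
def pvPrefix (m : Int) : List Int → List Int
  | [] => []
  | h :: t => m :: pvPrefix (max m h) t

lemma pvSel_mem (g : Int → Int) (j : Int) :
    ∀ (rows : List Int) (m : Int) (p : Int × Int), p ∈ pvSel g j rows m → g p.1 > m ∧ p.2 = j := by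
  intro rows
  induction rows with
  | nil => intro m p hp; simp [pvSel] at hp
  | cons i rest ih =>
    intro m p hp
    simp only [pvSel] at hp
    split at hp
    · rcases List.mem_cons.mp hp with h | h
      · subst h; exact ⟨by simpa using ‹g i > m›, rfl⟩
      · obtain ⟨h1, h2⟩ := ih _ _ h
        exact ⟨lt_trans ‹g i > m› h1, h2⟩
    · exact ih _ _ hp

lemma pvSel_nodup (g : Int → Int) (j : Int) :
    ∀ (rows : List Int) (m : Int), (pvSel g j rows m).Nodup := by
  intro rows
  induction rows with
  | nil => intro m; simp [pvSel]
  | cons i rest ih =>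
    intro m
    simp only [pvSel]
    split
    · refine List.nodup_cons.mpr ⟨fun hmem => ?_, ih _⟩
      have := (pvSel_mem g j rest (g i) _ hmem).1
      simp only at this
      exact absurd this (lt_irrefl _)
    · exact ih _

lemma pvInnerA (heights : List (List Int)) (j : Int) :
    ∀ (rows : List Int) (s : PySem.Set (Int × Int)) (m : Int),
    (∀ p ∈ s, p.2 = j → (fun i => PySem.List.pyGetD (PySem.List.pyGetD heights i []) j 0) p.1 ≤ m) →
    rows.foldl
      (fun (st : PySem.Set (Int × Int) × Int) i =>
        if PySem.List.pyGetD (PySem.List.pyGetD heights i []) j 0 > st.2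
        then (PySem.Set.add st.1 (i, j), PySem.List.pyGetD (PySem.List.pyGetD heights i []) j 0)
        else st) (s, m)
      = (s ++ pvSel (fun i => PySem.List.pyGetD (PySem.List.pyGetD heights i []) j 0) j rows m,
         rows.foldl (fun m i => max m (PySem.List.pyGetD (PySem.List.pyGetD heights i []) j 0)) m) := by
  intro rows
  induction rows with
  | nil => intro s m hinv; simp [pvSel]
  | cons i rest ih =>
    intro s m hinv
    simp only [List.foldl_cons, pvSel]
    by_cases hc : PySem.List.pyGetD (PySem.List.pyGetD heights i []) j 0 > m
    · have hmem : (i, j) ∉ s := fun hm => absurd (hinv _ hm rfl) (by simpa using hc)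
      have hadd : PySem.Set.add s (i, j) = s ++ [(i, j)] := by
        simp only [PySem.Set.add]
        rw [if_neg]
        simp only [PySem.Set.contains_eq_listContains]
        simpa using hmem
      rw [if_pos hc, hadd]
      rw [ih (s ++ [(i, j)]) (PySem.List.pyGetD (PySem.List.pyGetD heights i []) j 0) ?_]
      · rw [max_eq_right (le_of_lt hc), if_pos hc]
        simp
      · intro p hp hpj
        rcases List.mem_append.mp hp with h | h
        · exact le_trans (hinv p h hpj) (le_of_lt hc)
        · simp at h; subst h; simp
    · rw [if_neg hc]
      rw [ih s m hinv, max_eq_left (by omega), if_neg hc]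

lemma pvPrefixB : ∀ (col q : List Int) (m : Int),
    col.foldl (fun (st : List Int × Int) h => (st.1 ++ [st.2], max st.2 h)) (q, m)
      = (q ++ pvPrefix m col, col.foldl (fun m h => max m h) m) := by
  intro col
  induction col with
  | nil => intro q m; simp [pvPrefix]
  | cons h t ih =>
    intro q m
    simp only [List.foldl_cons, pvPrefix]
    rw [ih (q ++ [m]) (max m h)]
    simp

lemma pvInnerA' (heights : List (List Int)) (j : Int) (rows : List Int) :
    (rows.foldl
      (fun (st : PySem.Set (Int × Int) × Int) i =>
        if PySem.List.pyGetD (PySem.List.pyGetD heights i []) j 0 > st.2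
        then (PySem.Set.add st.1 (i, j), PySem.List.pyGetD (PySem.List.pyGetD heights i []) j 0)
        else st) (PySem.Set.empty, -1)).1
    = pvSel (fun i => PySem.List.pyGetD (PySem.List.pyGetD heights i []) j 0) j rows (-1) := by
  rw [pvInnerA heights j rows PySem.Set.empty (-1) (by intro p hp; simp [PySem.Set.empty] at hp)]
  rfl

lemma pvPrefixB' (col : List Int) :
    (col.foldl (fun (st : List Int × Int) h => (st.1 ++ [st.2], max st.2 h)) ([], -1)).1
    = pvPrefix (-1) col := by
  rw [pvPrefixB col [] (-1)]
  rfl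

lemma pvZipSel (g : Int → Int) (j : Int) :
    ∀ (rows : List Int) (m : Int),
    ((rows.zip (rows.map g)).zip (pvPrefix m (rows.map g))).filterMap
        (fun x => if x.1.2 > x.2 then some (x.1.1, j) else none)
      = pvSel g j rows m := by
  intro rows
  induction rows with
  | nil => intro m; simp [pvSel, pvPrefix]
  | cons i rest ih =>
    intro m
    simp only [List.map_cons, pvPrefix, List.zip_cons_cons, List.filterMap_cons, pvSel]
    by_cases hc : g i > m
    · rw [if_pos hc, if_pos hc, max_eq_right (le_of_lt hc), ih (g i)]
    · rw [if_neg hc, if_neg hc, max_eq_left (by omega), ih m]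

lemma pvFlatNodup (heights : List (List Int)) (rows : List Int) :
    ∀ (js : List Int), js.Nodup →
    (js.flatMap (fun j => pvSel (fun i => PySem.List.pyGetD (PySem.List.pyGetD heights i []) j 0) j rows (-1))).Nodup := by
  intro js
  induction js with
  | nil => intro _; simp
  | cons j rest ih =>
    intro hnd
    rcases List.nodup_cons.mp hnd with ⟨hj, hrest⟩
    simp only [List.flatMap_cons]
    refine List.Nodup.append (pvSel_nodup _ j rows (-1)) (ih hrest) ?_
    intro p hp hp'
    have h1 := (pvSel_mem _ j rows (-1) p hp).2
    rcases List.mem_flatMap.mp hp' with ⟨j', hj', hpj'⟩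
    have h2 := (pvSel_mem _ j' rows (-1) p hpj').2
    exact hj (by rw [← h1, h2]; exact hj')

lemma pvOuterA (heights : List (List Int)) (rows : List Int) :
    ∀ (js : List Int), js.Nodup →
    ∀ (vis : PySem.Set (Int × Int)), (∀ p ∈ vis, p.2 ∉ js) →
    js.foldl
      (fun (visibles : PySem.Set (Int × Int)) j =>
        PySem.Set.union visibles
          (rows.foldl
            (fun (st : PySem.Set (Int × Int) × Int) i =>
              if PySem.List.pyGetD (PySem.List.pyGetD heights i []) j 0 > st.2
              then (PySem.Set.add st.1 (i, j), PySem.List.pyGetD (PySem.List.pyGetD heights i []) j 0)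
              else st)
            (PySem.Set.empty, -1)).1) vis
    = vis ++ js.flatMap (fun j => pvSel (fun i => PySem.List.pyGetD (PySem.List.pyGetD heights i []) j 0) j rows (-1)) := by
  intro js
  induction js with
  | nil => intro _ vis _; simp
  | cons j rest ih =>
    intro hnd vis hinv
    rcases List.nodup_cons.mp hnd with ⟨hj, hrest⟩
    simp only [List.foldl_cons, List.flatMap_cons]
    rw [pvInnerA' heights j rows]
    have hsel := pvSel_nodup (fun i => PySem.List.pyGetD (PySem.List.pyGetD heights i []) j 0) j rows (-1)
    have hunion : PySem.Set.union vis
        (pvSel (fun i => PySem.List.pyGetD (PySem.List.pyGetD heights i []) j 0) j rows (-1))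
        = vis ++ pvSel (fun i => PySem.List.pyGetD (PySem.List.pyGetD heights i []) j 0) j rows (-1) := by
      rw [PySem.Set.union, PySem.Set.update_eq_append_filter,
          PySem.Set.ofList_eq_self_of_nodup _ hsel]
      congr 1
      refine List.filter_eq_self.mpr ?_
      intro p hp
      have h1 := (pvSel_mem _ j rows (-1) p hp).2
      simp only [PySem.Set.contains_eq_listContains, Bool.not_eq_eq_eq_not, Bool.not_true,
        List.contains_eq_mem, decide_eq_false_iff_not]
      intro hmem
      exact (hinv p hmem) (by rw [h1]; exact List.mem_cons_self)
    rw [hunion, ih hrest]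
    · rw [List.append_assoc]
    · intro p hp
      rcases List.mem_append.mp hp with h | h
      · exact fun hc => (hinv p h) (List.mem_cons_of_mem _ hc)
      · have h1 := (pvSel_mem _ j rows (-1) p h).2
        rw [h1]; exact hj

lemma pvOuterB (heights : List (List Int)) (rows : List Int) :
    ∀ (js : List Int) (acc : List (Int × Int)),
    js.foldl
      (fun (acc : List (Int × Int)) j =>
        acc ++ ((rows.zip (rows.map (fun i => PySem.List.pyGetD (PySem.List.pyGetD heights i []) j 0))).zip
            ((rows.map (fun i => PySem.List.pyGetD (PySem.List.pyGetD heights i []) j 0)).foldl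
              (fun (st : List Int × Int) h => (st.1 ++ [st.2], max st.2 h)) ([], -1)).1).filterMap
          (fun x => if x.1.2 > x.2 then some (x.1.1, j) else none)) acc
    = acc ++ js.flatMap (fun j => pvSel (fun i => PySem.List.pyGetD (PySem.List.pyGetD heights i []) j 0) j rows (-1)) := by
  intro js
  induction js with
  | nil => intro acc; simp
  | cons j rest ih =>
    intro acc
    simp only [List.foldl_cons, List.flatMap_cons]
    rw [pvPrefixB', pvZipSel (fun i => PySem.List.pyGetD (PySem.List.pyGetD heights i []) j 0) j rows (-1)]
    rw [ih, List.append_assoc]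

-- ===== VERDICT (by name: the statement is the Claim_ definition above) =====
theorem visibles_in_cols_spec : Claim_equal_visibles_in_cols := by
  intro heights rows _hdom _hpre
  simp only [Spec_visibles_in_cols, visibles_in_cols, visibles_in_cols_alt]
  have hnd := PySem.List.nodup_pyRange_one (a := 0) (b := ((PySem.List.pyGetD heights 0 []).length : Int))
  rw [pvOuterA heights rows _ hnd PySem.Set.empty (by intro p hp; simp [PySem.Set.empty] at hp)]
  rw [pvOuterB heights rows _ []]
  simp only [PySem.Set.empty, List.nil_append]
  exact (PySem.Set.ofList_eq_self_of_nodup _ (pvFlatNodup heights rows _ hnd)).symm
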